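-- pv_equiv track=rewrite | github.com/Shahzain-Ali/ai-employee-fte-system | src/orchestrator/local_orchestrator.py | _parse_update_sections
-- ===== SOURCE A (Python) =====
-- def _parse_update_sections(content: str) -> dict:
--     """Parse sections from a Cloud status update file."""
--     result = {"actions": [], "alerts": [], "pending": []}
--     current_section = None
--
--     for line in content.splitlines():
--         stripped = line.strip()
--         if stripped == "## Actions Since Last Update":
--             current_section = "actions"
--         elif stripped == "## Pending Approvals":
--             current_section = "pending"
--         elif stripped == "## Alerts":
--             current_section = "alerts"
--         elif stripped.startswith("## "):
--             current_section = None
--         elif current_section and stripped.startswith("- ") and stripped != "- None":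
--             result[current_section].append(stripped[2:])
--
--     return result
-- ===== SOURCE B (Python) =====
-- def _parse_update_sections(content: str) -> dict:
--     """Parse sections from a Cloud status update file (segment-grouping rewrite)."""
--     # First pass: cut the (stripped) lines into header-led segments.
--     segments = []
--     header = None
--     body = []
--     for line in content.splitlines():
--         s = line.strip()
--         if s.startswith("## "):
--             if header is not None:
--                 segments.append((header, body))
--             header, body = s, []
--         elif header is not None:
--             body.append(s)
--     if header is not None:
--         segments.append((header, body))
--     # Second pass: keep only the three known segments, extracting their "- " items.
--     titles = {
--         "## Actions Since Last Update": "actions",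
--         "## Pending Approvals": "pending",
--         "## Alerts": "alerts",
--     }
--     result = {"actions": [], "alerts": [], "pending": []}
--     for hdr, lines in segments:
--         key = titles.get(hdr)
--         if key is not None:
--             result[key].extend(s[2:] for s in lines if s.startswith("- ") and s != "- None")
--     return result
-- ===== Notes on version B (the rewrite author's own statement) =====
-- stated objective: alternative
-- what changed: Replaced the flat current_section state machine with a two-pass decomposition: first group lines into (header, body) segments, then extract the dash items of the three recognized segments into the result dict.
import Mathlib
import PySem

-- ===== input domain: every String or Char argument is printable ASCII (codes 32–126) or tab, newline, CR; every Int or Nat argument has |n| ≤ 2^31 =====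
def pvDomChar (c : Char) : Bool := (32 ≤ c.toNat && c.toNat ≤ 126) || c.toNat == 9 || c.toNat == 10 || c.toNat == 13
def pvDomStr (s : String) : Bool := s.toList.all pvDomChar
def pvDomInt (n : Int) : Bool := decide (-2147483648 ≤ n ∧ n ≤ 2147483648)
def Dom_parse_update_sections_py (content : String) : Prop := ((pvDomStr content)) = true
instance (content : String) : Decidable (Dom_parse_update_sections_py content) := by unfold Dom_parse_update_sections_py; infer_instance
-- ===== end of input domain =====

-- B replaces A's flat current_section state machine with a two-pass decomposition
-- (group lines into header-led segments, then extract items from the three known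
-- segments); same O(n) cost, alternative structure.


-- ===== PORT A =====
-- A's loop: one pass, a `current_section` state variable, appending into the dict.
def pvALoop : List String → PySem.Dict String (List String) → Option String → PySem.Dict String (List String)
  | [], result, _ => result
  | line :: rest, result, cur =>
    let stripped := PySem.Str.strip line
    if stripped = "## Actions Since Last Update" then
      pvALoop rest result (some "actions")
    else if stripped = "## Pending Approvals" then
      pvALoop rest result (some "pending")
    else if stripped = "## Alerts" then
      pvALoop rest result (some "alerts")
    else if PySem.Str.startswith stripped "## " then
      pvALoop rest result none
    else
      match cur with
      | some sec =>
        if PySem.Str.startswith stripped "- " ∧ stripped ≠ "- None" then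
          pvALoop rest
            (result.modify sec [] (fun v => v ++ [PySem.Str.slice stripped (some 2) none])) cur
        else pvALoop rest result cur
      | none => pvALoop rest result cur

def parse_update_sections_py (content : String) : List (String × List String) :=
  (pvALoop (PySem.Str.splitlines content)
    (((PySem.Dict.empty.insert "actions" ([] : List String)).insert "alerts" []).insert "pending" [])
    none).items

-- ===== PORT B =====
-- B first pass: group stripped lines into (header, body) segments.
def pvBSegs : List String → Option String → List String → List (String × List String)
  | [], none, _ => []
  | [], some h, body => [(h, body)]
  | line :: rest, header, body =>
    let s := PySem.Str.strip line
    if PySem.Str.startswith s "## " then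
      match header with
      | none => pvBSegs rest (some s) []
      | some h => (h, body) :: pvBSegs rest (some s) []
    else
      match header with
      | some _ => pvBSegs rest header (body ++ [s])
      | none => pvBSegs rest header body

-- B's titles.get
def pvTitleKey (h : String) : Option String :=
  if h = "## Actions Since Last Update" then some "actions"
  else if h = "## Pending Approvals" then some "pending"
  else if h = "## Alerts" then some "alerts"
  else none

-- B's item comprehension over a segment body
def pvItems (body : List String) : List String :=
  body.filterMap (fun s =>
    if PySem.Str.startswith s "- " ∧ s ≠ "- None" then
      some (PySem.Str.slice s (some 2) none)
    else none)

def parse_update_sections_py_alt (content : String) : List (String × List String) :=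
  let segments := pvBSegs (PySem.Str.splitlines content) none []
  (segments.foldl (fun d seg =>
      match pvTitleKey seg.1 with
      | some key => d.modify key [] (fun v => v ++ pvItems seg.2)
      | none => d)
    (((PySem.Dict.empty.insert "actions" ([] : List String)).insert "alerts" []).insert "pending" [])).items

-- ===== PRECONDITION & SPEC =====
def Spec_parse_update_sections_py (content : String) (out : List (String × List String)) : Prop := out = parse_update_sections_py_alt content
instance (content : String) (out : List (String × List String)) : Decidable (Spec_parse_update_sections_py content out) := by unfold Spec_parse_update_sections_py; infer_instance

-- ===== CLAIM (what is proved, stated in full; the proofs are below) =====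
def Claim_equal_parse_update_sections_py : Prop := ∀ (content : String), Dom_parse_update_sections_py content → Spec_parse_update_sections_py content (parse_update_sections_py content)

-- ===== LEMMAS AND PROOFS =====

-- Common characterisation: the items collected for key k while scanning lines with
-- A's current_section discipline.
def pvCollect : List String → Option String → String → List String
  | [], _, _ => []
  | line :: rest, cur, k =>
    let s := PySem.Str.strip line
    if s = "## Actions Since Last Update" then pvCollect rest (some "actions") k
    else if s = "## Pending Approvals" then pvCollect rest (some "pending") k
    else if s = "## Alerts" then pvCollect rest (some "alerts") k
    else if PySem.Str.startswith s "## " then pvCollect rest none k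
    else if cur = some k ∧ PySem.Str.startswith s "- " ∧ s ≠ "- None" then
      PySem.Str.slice s (some 2) none :: pvCollect rest cur k
    else pvCollect rest cur k

def pvKeyOf : Option String → Option String
  | none => none
  | some h => pvTitleKey h

def pvSegItems : List (String × List String) → String → List String
  | [], _ => []
  | (h, body) :: rest, k =>
    (if pvTitleKey h = some k then pvItems body else []) ++ pvSegItems rest k

theorem pvModify (key : String) (a b c : List String) (f : List String → List String)
    (h : key = "actions" ∨ key = "alerts" ∨ key = "pending") :
    (PySem.Dict.mk [("actions", a), ("alerts", b), ("pending", c)]).modify key [] f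
      = PySem.Dict.mk [("actions", if key = "actions" then f a else a),
                       ("alerts", if key = "alerts" then f b else b),
                       ("pending", if key = "pending" then f c else c)] := by
  rcases h with rfl | rfl | rfl <;>
    simp [PySem.Dict.modify, PySem.Dict.insert, PySem.Dict.getD, PySem.Dict.get?,
      PySem.Dict.contains]

theorem pvALoop_items (ls : List String) :
    ∀ (a b c : List String) (cur : Option String),
    (cur = none ∨ cur = some "actions" ∨ cur = some "alerts" ∨ cur = some "pending") →
    (pvALoop ls (PySem.Dict.mk [("actions", a), ("alerts", b), ("pending", c)]) cur).items
      = [("actions", a ++ pvCollect ls cur "actions"),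
         ("alerts", b ++ pvCollect ls cur "alerts"),
         ("pending", c ++ pvCollect ls cur "pending")] := by
  induction ls with
  | nil => intro a b c cur _; simp [pvALoop, pvCollect]
  | cons line rest ih =>
    intro a b c cur hcur
    rcases hcur with rfl | rfl | rfl | rfl
    · simp only [pvALoop, pvCollect]
      by_cases h1 : PySem.Str.strip line = "## Actions Since Last Update"
      · rw [if_pos h1, if_pos h1, if_pos h1, if_pos h1]
        exact ih a b c (some "actions") (by simp)
      rw [if_neg h1, if_neg h1, if_neg h1, if_neg h1]
      by_cases h2 : PySem.Str.strip line = "## Pending Approvals"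
      · rw [if_pos h2, if_pos h2, if_pos h2, if_pos h2]
        exact ih a b c (some "pending") (by simp)
      rw [if_neg h2, if_neg h2, if_neg h2, if_neg h2]
      by_cases h3 : PySem.Str.strip line = "## Alerts"
      · rw [if_pos h3, if_pos h3, if_pos h3, if_pos h3]
        exact ih a b c (some "alerts") (by simp)
      rw [if_neg h3, if_neg h3, if_neg h3, if_neg h3]
      by_cases h4 : PySem.Str.startswith (PySem.Str.strip line) "## " = true
      · rw [if_pos h4, if_pos h4, if_pos h4, if_pos h4]
        exact ih a b c none (by simp)
      rw [if_neg h4, if_neg h4, if_neg h4, if_neg h4]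
      rw [if_neg (show ¬((none : Option String) = some "actions" ∧
          PySem.Str.startswith (PySem.Str.strip line) "- " = true ∧
          PySem.Str.strip line ≠ "- None") by simp),
        if_neg (show ¬((none : Option String) = some "alerts" ∧
          PySem.Str.startswith (PySem.Str.strip line) "- " = true ∧
          PySem.Str.strip line ≠ "- None") by simp),
        if_neg (show ¬((none : Option String) = some "pending" ∧
          PySem.Str.startswith (PySem.Str.strip line) "- " = true ∧
          PySem.Str.strip line ≠ "- None") by simp)]
      exact ih a b c none (by simp)
    · simp only [pvALoop, pvCollect]
      by_cases h1 : PySem.Str.strip line = "## Actions Since Last Update"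
      · rw [if_pos h1, if_pos h1, if_pos h1, if_pos h1]
        exact ih a b c (some "actions") (by simp)
      rw [if_neg h1, if_neg h1, if_neg h1, if_neg h1]
      by_cases h2 : PySem.Str.strip line = "## Pending Approvals"
      · rw [if_pos h2, if_pos h2, if_pos h2, if_pos h2]
        exact ih a b c (some "pending") (by simp)
      rw [if_neg h2, if_neg h2, if_neg h2, if_neg h2]
      by_cases h3 : PySem.Str.strip line = "## Alerts"
      · rw [if_pos h3, if_pos h3, if_pos h3, if_pos h3]
        exact ih a b c (some "alerts") (by simp)
      rw [if_neg h3, if_neg h3, if_neg h3, if_neg h3]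
      by_cases h4 : PySem.Str.startswith (PySem.Str.strip line) "## " = true
      · rw [if_pos h4, if_pos h4, if_pos h4, if_pos h4]
        exact ih a b c none (by simp)
      rw [if_neg h4, if_neg h4, if_neg h4, if_neg h4]
      by_cases h5 : PySem.Str.startswith (PySem.Str.strip line) "- " = true ∧
          ¬ PySem.Str.strip line = "- None"
      · rw [if_pos h5,
          if_pos (show True ∧ PySem.Str.startswith (PySem.Str.strip line) "- " = true ∧
            PySem.Str.strip line ≠ "- None" from ⟨trivial, h5.1, h5.2⟩),
        if_neg (show ¬(some "actions" = some "alerts" ∧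
          PySem.Str.startswith (PySem.Str.strip line) "- " = true ∧
          PySem.Str.strip line ≠ "- None") by simp),
        if_neg (show ¬(some "actions" = some "pending" ∧
          PySem.Str.startswith (PySem.Str.strip line) "- " = true ∧
          PySem.Str.strip line ≠ "- None") by simp),
          pvModify _ _ _ _ _ (Or.inl rfl)]
        simp only [reduceIte, String.reduceEq]
        rw [ih (a ++ [PySem.Str.slice (PySem.Str.strip line) (some 2) none]) b c (some "actions") (by simp)]
        simp
      · rw [if_neg h5,
          if_neg (show ¬(True ∧ PySem.Str.startswith (PySem.Str.strip line) "- " = true ∧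
            PySem.Str.strip line ≠ "- None") from fun h => h5 ⟨h.2.1, h.2.2⟩),
        if_neg (show ¬(some "actions" = some "alerts" ∧
          PySem.Str.startswith (PySem.Str.strip line) "- " = true ∧
          PySem.Str.strip line ≠ "- None") by simp),
        if_neg (show ¬(some "actions" = some "pending" ∧
          PySem.Str.startswith (PySem.Str.strip line) "- " = true ∧
          PySem.Str.strip line ≠ "- None") by simp)]
        exact ih a b c (some "actions") (by simp)
    · simp only [pvALoop, pvCollect]
      by_cases h1 : PySem.Str.strip line = "## Actions Since Last Update"
      · rw [if_pos h1, if_pos h1, if_pos h1, if_pos h1]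
        exact ih a b c (some "actions") (by simp)
      rw [if_neg h1, if_neg h1, if_neg h1, if_neg h1]
      by_cases h2 : PySem.Str.strip line = "## Pending Approvals"
      · rw [if_pos h2, if_pos h2, if_pos h2, if_pos h2]
        exact ih a b c (some "pending") (by simp)
      rw [if_neg h2, if_neg h2, if_neg h2, if_neg h2]
      by_cases h3 : PySem.Str.strip line = "## Alerts"
      · rw [if_pos h3, if_pos h3, if_pos h3, if_pos h3]
        exact ih a b c (some "alerts") (by simp)
      rw [if_neg h3, if_neg h3, if_neg h3, if_neg h3]
      by_cases h4 : PySem.Str.startswith (PySem.Str.strip line) "## " = true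
      · rw [if_pos h4, if_pos h4, if_pos h4, if_pos h4]
        exact ih a b c none (by simp)
      rw [if_neg h4, if_neg h4, if_neg h4, if_neg h4]
      by_cases h5 : PySem.Str.startswith (PySem.Str.strip line) "- " = true ∧
          ¬ PySem.Str.strip line = "- None"
      · rw [if_pos h5,
          if_pos (show True ∧ PySem.Str.startswith (PySem.Str.strip line) "- " = true ∧
            PySem.Str.strip line ≠ "- None" from ⟨trivial, h5.1, h5.2⟩),
        if_neg (show ¬(some "alerts" = some "actions" ∧
          PySem.Str.startswith (PySem.Str.strip line) "- " = true ∧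
          PySem.Str.strip line ≠ "- None") by simp),
        if_neg (show ¬(some "alerts" = some "pending" ∧
          PySem.Str.startswith (PySem.Str.strip line) "- " = true ∧
          PySem.Str.strip line ≠ "- None") by simp),
          pvModify _ _ _ _ _ (Or.inr (Or.inl rfl))]
        simp only [reduceIte, String.reduceEq]
        rw [ih a (b ++ [PySem.Str.slice (PySem.Str.strip line) (some 2) none]) c (some "alerts") (by simp)]
        simp
      · rw [if_neg h5,
          if_neg (show ¬(True ∧ PySem.Str.startswith (PySem.Str.strip line) "- " = true ∧
            PySem.Str.strip line ≠ "- None") from fun h => h5 ⟨h.2.1, h.2.2⟩),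
        if_neg (show ¬(some "alerts" = some "actions" ∧
          PySem.Str.startswith (PySem.Str.strip line) "- " = true ∧
          PySem.Str.strip line ≠ "- None") by simp),
        if_neg (show ¬(some "alerts" = some "pending" ∧
          PySem.Str.startswith (PySem.Str.strip line) "- " = true ∧
          PySem.Str.strip line ≠ "- None") by simp)]
        exact ih a b c (some "alerts") (by simp)
    · simp only [pvALoop, pvCollect]
      by_cases h1 : PySem.Str.strip line = "## Actions Since Last Update"
      · rw [if_pos h1, if_pos h1, if_pos h1, if_pos h1]
        exact ih a b c (some "actions") (by simp)
      rw [if_neg h1, if_neg h1, if_neg h1, if_neg h1]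
      by_cases h2 : PySem.Str.strip line = "## Pending Approvals"
      · rw [if_pos h2, if_pos h2, if_pos h2, if_pos h2]
        exact ih a b c (some "pending") (by simp)
      rw [if_neg h2, if_neg h2, if_neg h2, if_neg h2]
      by_cases h3 : PySem.Str.strip line = "## Alerts"
      · rw [if_pos h3, if_pos h3, if_pos h3, if_pos h3]
        exact ih a b c (some "alerts") (by simp)
      rw [if_neg h3, if_neg h3, if_neg h3, if_neg h3]
      by_cases h4 : PySem.Str.startswith (PySem.Str.strip line) "## " = true
      · rw [if_pos h4, if_pos h4, if_pos h4, if_pos h4]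
        exact ih a b c none (by simp)
      rw [if_neg h4, if_neg h4, if_neg h4, if_neg h4]
      by_cases h5 : PySem.Str.startswith (PySem.Str.strip line) "- " = true ∧
          ¬ PySem.Str.strip line = "- None"
      · rw [if_pos h5,
          if_pos (show True ∧ PySem.Str.startswith (PySem.Str.strip line) "- " = true ∧
            PySem.Str.strip line ≠ "- None" from ⟨trivial, h5.1, h5.2⟩),
        if_neg (show ¬(some "pending" = some "actions" ∧
          PySem.Str.startswith (PySem.Str.strip line) "- " = true ∧
          PySem.Str.strip line ≠ "- None") by simp),
        if_neg (show ¬(some "pending" = some "alerts" ∧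
          PySem.Str.startswith (PySem.Str.strip line) "- " = true ∧
          PySem.Str.strip line ≠ "- None") by simp),
          pvModify _ _ _ _ _ (Or.inr (Or.inr rfl))]
        simp only [reduceIte, String.reduceEq]
        rw [ih a b (c ++ [PySem.Str.slice (PySem.Str.strip line) (some 2) none]) (some "pending") (by simp)]
        simp
      · rw [if_neg h5,
          if_neg (show ¬(True ∧ PySem.Str.startswith (PySem.Str.strip line) "- " = true ∧
            PySem.Str.strip line ≠ "- None") from fun h => h5 ⟨h.2.1, h.2.2⟩),
        if_neg (show ¬(some "pending" = some "actions" ∧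
          PySem.Str.startswith (PySem.Str.strip line) "- " = true ∧
          PySem.Str.strip line ≠ "- None") by simp),
        if_neg (show ¬(some "pending" = some "alerts" ∧
          PySem.Str.startswith (PySem.Str.strip line) "- " = true ∧
          PySem.Str.strip line ≠ "- None") by simp)]
        exact ih a b c (some "pending") (by simp)

theorem pvSegFold_items (segs : List (String × List String)) :
    ∀ (a b c : List String),
    ((segs.foldl (fun d seg =>
        match pvTitleKey seg.1 with
        | some key => d.modify key [] (fun v => v ++ pvItems seg.2)
        | none => d)
      (PySem.Dict.mk [("actions", a), ("alerts", b), ("pending", c)])).items)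
      = [("actions", a ++ pvSegItems segs "actions"),
         ("alerts", b ++ pvSegItems segs "alerts"),
         ("pending", c ++ pvSegItems segs "pending")] := by
  induction segs with
  | nil => intro a b c; simp [pvSegItems]
  | cons seg rest ih =>
    obtain ⟨h, body⟩ := seg
    intro a b c
    by_cases t1 : h = "## Actions Since Last Update"
    · have ht : pvTitleKey h = some "actions" := by simp [pvTitleKey, t1]
      simp only [List.foldl_cons, pvSegItems, ht, Option.some.injEq, String.reduceEq, reduceIte]
      rw [pvModify _ _ _ _ _ (Or.inl rfl)]
      simp only [reduceIte, String.reduceEq]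
      rw [ih (a ++ pvItems body) b c]
      simp
    by_cases t2 : h = "## Pending Approvals"
    · have ht : pvTitleKey h = some "pending" := by simp [pvTitleKey, t1, t2]
      simp only [List.foldl_cons, pvSegItems, ht, Option.some.injEq, String.reduceEq, reduceIte]
      rw [pvModify _ _ _ _ _ (Or.inr (Or.inr rfl))]
      simp only [reduceIte, String.reduceEq]
      rw [ih a b (c ++ pvItems body)]
      simp
    by_cases t3 : h = "## Alerts"
    · have ht : pvTitleKey h = some "alerts" := by simp [pvTitleKey, t1, t2, t3]
      simp only [List.foldl_cons, pvSegItems, ht, Option.some.injEq, String.reduceEq, reduceIte]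
      rw [pvModify _ _ _ _ _ (Or.inr (Or.inl rfl))]
      simp only [reduceIte, String.reduceEq]
      rw [ih a (b ++ pvItems body) c]
      simp
    · have ht : pvTitleKey h = none := by simp [pvTitleKey, t1, t2, t3]
      simp only [List.foldl_cons, pvSegItems, ht, reduceCtorEq, if_false, Bool.false_eq_true]
      rw [ih a b c]
      simp

theorem pvItems_append (xs ys : List String) : pvItems (xs ++ ys) = pvItems xs ++ pvItems ys := by
  simp [pvItems]

theorem pvItems_singleton (s : String) :
    pvItems [s] = if PySem.Str.startswith s "- " = true ∧ ¬ s = "- None" then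
      [PySem.Str.slice s (some 2) none] else [] := by
  by_cases h : PySem.Str.startswith s "- " = true ∧ ¬ s = "- None"
  · simp only [pvItems, List.filterMap_cons, List.filterMap_nil]
    rw [if_pos h, if_pos h]
  · simp only [pvItems, List.filterMap_cons, List.filterMap_nil]
    rw [if_neg h, if_neg h]

theorem pvSegItems_pvBSegs (ls : List String) :
    ∀ (hdr : Option String) (body : List String) (k : String),
    pvSegItems (pvBSegs ls hdr body) k
      = (if pvKeyOf hdr = some k then pvItems body else []) ++ pvCollect ls (pvKeyOf hdr) k := by
  induction ls with
  | nil =>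
    intro hdr body k
    cases hdr with
    | none => simp [pvBSegs, pvSegItems, pvCollect, pvKeyOf]
    | some h => simp [pvBSegs, pvSegItems, pvCollect, pvKeyOf]
  | cons line rest ih =>
    intro hdr body k
    by_cases hh : PySem.Str.startswith (PySem.Str.strip line) "## " = true
    by_cases s1 : PySem.Str.strip line = "## Actions Since Last Update"
    · cases hdr with
      | none =>
        simp only [pvBSegs, pvCollect, pvKeyOf, s1]
        rw [if_pos (show PySem.Str.startswith ("## Actions Since Last Update" : String) "## " = true by decide)]
        rw [ih (some "## Actions Since Last Update") [] k]
        simp [pvKeyOf, pvTitleKey, pvItems]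
      | some h0 =>
        simp only [pvBSegs, pvCollect, pvKeyOf, s1]
        rw [if_pos (show PySem.Str.startswith ("## Actions Since Last Update" : String) "## " = true by decide)]
        simp only [pvSegItems]
        rw [ih (some "## Actions Since Last Update") [] k]
        simp [pvKeyOf, pvTitleKey, pvItems]
    by_cases s2 : PySem.Str.strip line = "## Pending Approvals"
    · cases hdr with
      | none =>
        simp only [pvBSegs, pvCollect, pvKeyOf, s2]
        rw [if_pos (show PySem.Str.startswith ("## Pending Approvals" : String) "## " = true by decide)]
        rw [ih (some "## Pending Approvals") [] k]
        simp [pvKeyOf, pvTitleKey, pvItems]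
      | some h0 =>
        simp only [pvBSegs, pvCollect, pvKeyOf, s2]
        rw [if_pos (show PySem.Str.startswith ("## Pending Approvals" : String) "## " = true by decide)]
        simp only [pvSegItems]
        rw [ih (some "## Pending Approvals") [] k]
        simp [pvKeyOf, pvTitleKey, pvItems]
    by_cases s3 : PySem.Str.strip line = "## Alerts"
    · cases hdr with
      | none =>
        simp only [pvBSegs, pvCollect, pvKeyOf, s3]
        rw [if_pos (show PySem.Str.startswith ("## Alerts" : String) "## " = true by decide)]
        rw [ih (some "## Alerts") [] k]
        simp [pvKeyOf, pvTitleKey, pvItems]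
      | some h0 =>
        simp only [pvBSegs, pvCollect, pvKeyOf, s3]
        rw [if_pos (show PySem.Str.startswith ("## Alerts" : String) "## " = true by decide)]
        simp only [pvSegItems]
        rw [ih (some "## Alerts") [] k]
        simp [pvKeyOf, pvTitleKey, pvItems]
    · -- unknown "## " header
      cases hdr with
      | none =>
        simp only [pvBSegs, pvCollect, pvKeyOf]
        rw [if_neg s1, if_neg s2, if_neg s3, if_pos hh, if_pos hh]
        rw [ih (some (PySem.Str.strip line)) [] k]
        simp [pvKeyOf, pvTitleKey, s1, s2, s3, pvItems]
      | some h0 =>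
        simp only [pvBSegs, pvCollect, pvKeyOf]
        rw [if_neg s1, if_neg s2, if_neg s3, if_pos hh, if_pos hh]
        simp only [pvSegItems]
        rw [ih (some (PySem.Str.strip line)) [] k]
        simp [pvKeyOf, pvTitleKey, s1, s2, s3, pvItems]
    · -- ordinary line
      have s1 : ¬ PySem.Str.strip line = "## Actions Since Last Update" := by
        intro e; exact hh (by rw [e]; decide)
      have s2 : ¬ PySem.Str.strip line = "## Pending Approvals" := by
        intro e; exact hh (by rw [e]; decide)
      have s3 : ¬ PySem.Str.strip line = "## Alerts" := by
        intro e; exact hh (by rw [e]; decide)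
      cases hdr with
      | none =>
        simp only [pvBSegs, pvCollect, pvKeyOf]
        rw [if_neg s1, if_neg s2, if_neg s3, if_neg hh, if_neg hh,
            if_neg (show ¬((none : Option String) = some k ∧
              PySem.Str.startswith (PySem.Str.strip line) "- " = true ∧
              PySem.Str.strip line ≠ "- None") by simp)]
        rw [ih none body k]
        simp [pvKeyOf]
      | some h0 =>
        simp only [pvBSegs, pvCollect, pvKeyOf]
        rw [if_neg s1, if_neg s2, if_neg s3, if_neg hh, if_neg hh]
        rw [ih (some h0) (body ++ [PySem.Str.strip line]) k]
        simp only [pvKeyOf, pvItems_append, pvItems_singleton]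
        by_cases hc : pvTitleKey h0 = some k
        · rw [if_pos hc, if_pos hc]
          by_cases h5 : PySem.Str.startswith (PySem.Str.strip line) "- " = true ∧
              ¬ PySem.Str.strip line = "- None"
          · rw [if_pos h5,
              if_pos (show pvTitleKey h0 = some k ∧
                PySem.Str.startswith (PySem.Str.strip line) "- " = true ∧
                PySem.Str.strip line ≠ "- None" from ⟨hc, h5.1, h5.2⟩)]
            simp
          · rw [if_neg h5,
              if_neg (show ¬(pvTitleKey h0 = some k ∧
                PySem.Str.startswith (PySem.Str.strip line) "- " = true ∧
                PySem.Str.strip line ≠ "- None") from fun h => h5 ⟨h.2.1, h.2.2⟩)]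
            simp
        · rw [if_neg hc, if_neg hc,
            if_neg (show ¬(pvTitleKey h0 = some k ∧
              PySem.Str.startswith (PySem.Str.strip line) "- " = true ∧
              PySem.Str.strip line ≠ "- None") from fun h => hc h.1)]

-- ===== VERDICT (by name: the statement is the Claim_ definition above) =====
theorem parse_update_sections_py_spec : Claim_equal_parse_update_sections_py := by
  intro content _
  unfold Spec_parse_update_sections_py parse_update_sections_py parse_update_sections_py_alt
  have hinit : (((PySem.Dict.empty.insert "actions" ([] : List String)).insert "alerts" []).insert "pending" [])
      = PySem.Dict.mk [("actions", []), ("alerts", []), ("pending", [])] := by decide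
  rw [hinit]
  rw [pvALoop_items _ [] [] [] none (Or.inl rfl)]
  rw [pvSegFold_items]
  simp [pvSegItems_pvBSegs, pvKeyOf]
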